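-- pv_equiv track=rewrite | github.com/philipsun/gensurvey | code/sxpDataDUCSum.py | ParseUpperSection
-- ===== SOURCE A (Python) =====
-- def ParseUpperSection(sectionid):
--     para_seg = sectionid.split('.')
--     n = len(para_seg)
--     upper = para_seg[0:n-1]
--     if len(upper) == 0:
--         return ''
--     i = 0
--     s = ''
--     for u in upper:
--         if i == 0:
--             s = s+ u
--         else:
--             s = s + '.' + u
--         i = i + 1
--     return s
-- ===== SOURCE B (Python) =====
-- def ParseUpperSection(sectionid):
--     if '.' not in sectionid:
--         return ''
--     return sectionid[:sectionid.rfind('.')]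
-- ===== Notes on version B (the rewrite author's own statement) =====
-- stated objective: idiomatic
-- what changed: Replaces split-into-segments plus an indexed rejoin loop by a single right-to-left search for the last dot and one slice of the original string.
import Mathlib
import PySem

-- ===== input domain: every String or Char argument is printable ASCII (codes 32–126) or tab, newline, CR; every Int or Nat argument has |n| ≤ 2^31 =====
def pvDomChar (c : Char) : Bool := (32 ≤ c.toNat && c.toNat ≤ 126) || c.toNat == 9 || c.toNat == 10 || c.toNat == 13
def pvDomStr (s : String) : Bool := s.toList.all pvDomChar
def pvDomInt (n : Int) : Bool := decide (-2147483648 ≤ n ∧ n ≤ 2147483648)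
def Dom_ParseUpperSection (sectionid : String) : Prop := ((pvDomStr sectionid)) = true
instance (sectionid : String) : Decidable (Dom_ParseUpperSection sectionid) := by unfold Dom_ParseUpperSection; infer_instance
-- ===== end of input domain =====

-- B drops A's split-then-rejoin loop: it finds the last '.' and slices the original string up to it.

-- ===== PORT A =====
-- sectionid.split('.'): '.' is a non-empty separator, so split? always returns some; getD [] only discharges the option.
-- The rejoin loop carries A's exact state (i, s); Python string concatenation is ported on the char list (s + u = s ++ u.toList).
def ParseUpperSection (sectionid : String) : String :=
  let para_seg : List String := (PySem.Str.split? sectionid ".").getD []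
  let n : Int := PySem.List.len para_seg
  let upper : List String := PySem.List.slice para_seg (some 0) (some (n - 1))
  if PySem.List.len upper == 0 then ""
  else
    let st := upper.foldl
      (fun (st : Int × List Char) u =>
        if st.1 == 0 then (st.1 + 1, st.2 ++ u.toList)
        else (st.1 + 1, (st.2 ++ ['.']) ++ u.toList))
      ((0 : Int), ([] : List Char))
    String.ofList st.2

-- ===== PORT B =====
def ParseUpperSection_alt (sectionid : String) : String :=
  if PySem.Str.isIn "." sectionid then
    PySem.Str.slice sectionid none (some (PySem.Str.rfind sectionid "."))
  else ""

-- ===== PRECONDITION & SPEC =====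
def Spec_ParseUpperSection (sectionid : String) (out : String) : Prop := out = ParseUpperSection_alt sectionid
instance (sectionid : String) (out : String) : Decidable (Spec_ParseUpperSection sectionid out) := by unfold Spec_ParseUpperSection; infer_instance

-- ===== CLAIM (what is proved, stated in full; the proofs are below) =====
def Claim_equal_ParseUpperSection : Prop := ∀ (sectionid : String), Dom_ParseUpperSection sectionid → Spec_ParseUpperSection sectionid (ParseUpperSection sectionid)

-- ===== LEMMAS AND PROOFS =====

-- Structural model of str.split('.') on char lists.
def mySplit : List Char → List (List Char)
  | [] => [[]]
  | c :: rest =>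
    if c = '.' then [] :: mySplit rest
    else
      match mySplit rest with
      | [] => [[c]]
      | h :: t => (c :: h) :: t

-- Index of the last '.' (meaningful when '.' ∈ cs).
def lastDotNat : List Char → Nat
  | [] => 0
  | _ :: rest => if '.' ∈ rest then lastDotNat rest + 1 else 0

-- 'join with dots' of a segment list.
def joinDots : List (List Char) → List Char
  | [] => []
  | h :: t => h ++ t.flatMap (fun u => '.' :: u)

theorem mySplit_ne_nil (cs : List Char) : mySplit cs ≠ [] := by
  cases cs with
  | nil => simp [mySplit]
  | cons c rest =>
    simp only [mySplit]
    split
    · simp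
    · cases h : mySplit rest <;> simp

theorem mySplit_cons_dot (rest : List Char) : mySplit ('.' :: rest) = [] :: mySplit rest := by
  simp [mySplit]

theorem mySplit_cons_ne (c : Char) (rest h : List Char) (t : List (List Char))
    (hc : ¬ c = '.') (hm : mySplit rest = h :: t) :
    mySplit (c :: rest) = (c :: h) :: t := by
  simp only [mySplit, if_neg hc, hm]

theorem mySplit_no_dot (cs : List Char) (h : '.' ∉ cs) : mySplit cs = [cs] := by
  induction cs with
  | nil => rfl
  | cons c rest ih =>
    simp only [List.mem_cons, not_or] at h
    rw [mySplit_cons_ne c rest rest [] (fun hEq => h.1 hEq.symm) (ih h.2)]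

theorem mySplit_two_le (cs : List Char) (h : '.' ∈ cs) : 2 ≤ (mySplit cs).length := by
  induction cs with
  | nil => simp at h
  | cons c rest ih =>
    by_cases hc : c = '.'
    · subst hc
      rw [mySplit_cons_dot]
      have := List.length_pos_iff.mpr (mySplit_ne_nil rest)
      simp only [List.length_cons]
      omega
    · have hr : '.' ∈ rest := by
        rcases List.mem_cons.mp h with h' | h'
        · exact absurd h'.symm hc
        · exact h'
      have h2 := ih hr
      cases hm : mySplit rest with
      | nil => exact absurd hm (mySplit_ne_nil rest)
      | cons a t =>
        rw [mySplit_cons_ne c rest a t hc hm]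
        rw [hm] at h2
        simpa using h2

theorem joinDots_nil_cons (l : List (List Char)) (hl : l ≠ []) :
    joinDots ([] :: l) = '.' :: joinDots l := by
  cases l with
  | nil => exact absurd rfl hl
  | cons x xs => simp [joinDots]

theorem joinDots_cons_head (c : Char) (h : List Char) (t : List (List Char)) :
    joinDots ((c :: h) :: t) = c :: joinDots (h :: t) := by
  simp [joinDots]

-- splitOn.go with enough fuel computes mySplit (with the accumulators folded in).
theorem splitOn_go_eq (fuel : Nat) (l cur : List Char) (acc : List (List Char))
    (hf : l.length ≤ fuel) :
    PySem.Chars.splitOn.go ['.'] fuel l cur acc =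
      acc.reverse ++ (mySplit l).modifyHead (cur.reverse ++ ·) := by
  induction l generalizing fuel cur acc with
  | nil =>
    cases fuel with
    | zero => simp [PySem.Chars.splitOn.go, mySplit]
    | succ f => simp [PySem.Chars.splitOn.go, mySplit]
  | cons c rest ih =>
    cases fuel with
    | zero => simp at hf
    | succ f =>
      by_cases hc : c = '.'
      · have hpre : List.isPrefixOf ['.'] (c :: rest) = true := by
          simp [List.isPrefixOf, hc]
        rw [PySem.Chars.splitOn.go]
        simp only [hpre, if_pos]
        have hdrop : List.drop (['.'] : List Char).length (c :: rest) = rest := by simp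
        rw [hdrop, ih f [] (cur.reverse :: acc) (by simpa using Nat.le_of_succ_le_succ hf)]
        subst hc
        rw [mySplit_cons_dot]
        cases mySplit rest <;> simp
      · have hpre : List.isPrefixOf ['.'] (c :: rest) = false := by
          simp [List.isPrefixOf]
          intro h; exact absurd h.symm hc
        rw [PySem.Chars.splitOn.go]
        simp only [hpre]
        rw [if_neg (by simp)]
        rw [ih f (c :: cur) acc (by simpa using Nat.le_of_succ_le_succ hf)]
        cases hm : mySplit rest with
        | nil => exact absurd hm (mySplit_ne_nil rest)
        | cons h t => rw [mySplit_cons_ne c rest h t hc hm]; simp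

theorem splitOn_eq_mySplit (cs : List Char) :
    PySem.Chars.splitOn cs ['.'] = mySplit cs := by
  rw [PySem.Chars.splitOn, splitOn_go_eq (cs.length + 1) cs [] [] (by omega)]
  cases mySplit cs <;> simp

theorem split_dot (s : String) :
    PySem.Str.split? s "." = some ((mySplit s.toList).map String.ofList) := by
  have hsep : (".".toList) = ['.'] := rfl
  rw [PySem.Str.split?, PySem.Chars.split?, hsep]
  simp [splitOn_eq_mySplit]

-- ['.'] is a prefix of cs.drop k  ↔  cs[k]? = '.'
theorem isPrefixOf_dot_drop (cs : List Char) (k : Nat) :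
    List.isPrefixOf ['.'] (cs.drop k) = true ↔ cs[k]? = some '.' := by
  rw [List.isPrefixOf_iff_prefix]
  constructor
  · intro h
    rcases h with ⟨t, ht⟩
    have : (cs.drop k)[0]? = some '.' := by rw [← ht]; rfl
    simpa [List.getElem?_drop] using this
  · intro h
    have h0 : (cs.drop k)[0]? = some '.' := by simpa [List.getElem?_drop] using h
    cases hd : cs.drop k with
    | nil => simp [hd] at h0
    | cons a t =>
      rw [hd] at h0
      simp at h0
      exact ⟨t, by simp [h0]⟩

theorem lastDotNat_spec (cs : List Char) (h : '.' ∈ cs) :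
    cs[lastDotNat cs]? = some '.' ∧ ∀ k, lastDotNat cs < k → cs[k]? ≠ some '.' := by
  induction cs with
  | nil => simp at h
  | cons c rest ih =>
    by_cases hr : '.' ∈ rest
    · obtain ⟨h1, h2⟩ := ih hr
      refine ⟨by simpa [lastDotNat, hr] using h1, ?_⟩
      intro k hk
      simp only [lastDotNat, if_pos hr] at hk
      cases k with
      | zero => omega
      | succ k' =>
        simp only [List.getElem?_cons_succ]
        exact h2 k' (by omega)
    · have hc : c = '.' := by
        rcases List.mem_cons.mp h with h' | h'
        · exact h'.symm
        · exact absurd h' hr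
      refine ⟨by simp [lastDotNat, hr, hc], ?_⟩
      intro k hk
      simp only [lastDotNat, if_neg hr] at hk
      cases k with
      | zero => omega
      | succ k' =>
        simp only [List.getElem?_cons_succ]
        intro hbad
        exact hr (by
          rcases List.getElem?_eq_some_iff.mp hbad with ⟨hlt, hEq⟩
          exact hEq ▸ List.getElem_mem hlt)

theorem rfind_go_of_last (cs : List Char) (j m : Nat) (hm : m ≤ j)
    (hdot : cs[m]? = some '.')
    (habove : ∀ k, m < k → k ≤ j → cs[k]? ≠ some '.') :
    PySem.Chars.rfind.go cs ['.'] j = (m : Int) := by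
  induction j with
  | zero =>
    have hm0 : m = 0 := Nat.le_zero.mp hm
    subst hm0
    rw [PySem.Chars.rfind.go]
    rw [if_pos (by simpa using (isPrefixOf_dot_drop cs 0).mpr hdot)]
    simp
  | succ j' ih =>
    rw [PySem.Chars.rfind.go]
    by_cases hEq : m = j' + 1
    · subst hEq
      rw [if_pos ((isPrefixOf_dot_drop cs (j' + 1)).mpr hdot)]
    · have hmj : m ≤ j' := by omega
      rw [if_neg (by
        intro hpf
        exact habove (j' + 1) (by omega) (by omega) ((isPrefixOf_dot_drop cs (j' + 1)).mp hpf))]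
      exact ih hmj (fun k hk1 hk2 => habove k hk1 (by omega))

theorem rfind_eq_lastDotNat (cs : List Char) (h : '.' ∈ cs) :
    PySem.Chars.rfind cs ['.'] = (lastDotNat cs : Int) := by
  obtain ⟨h1, h2⟩ := lastDotNat_spec cs h
  rw [PySem.Chars.rfind]
  exact rfind_go_of_last cs cs.length (lastDotNat cs)
    (by have := (List.getElem?_eq_some_iff.mp h1).1; omega) h1
    (fun k hk1 _ => h2 k hk1)

-- join of all segments but the last = the original string cut at the last dot
theorem joinDots_dropLast (cs : List Char) (h : '.' ∈ cs) :
    joinDots (mySplit cs).dropLast = cs.take (lastDotNat cs) := by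
  induction cs with
  | nil => simp at h
  | cons c rest ih =>
    by_cases hr : '.' ∈ rest
    · have h2 := mySplit_two_le rest hr
      cases hm : mySplit rest with
      | nil => exact absurd hm (mySplit_ne_nil rest)
      | cons a t =>
        have ht : t ≠ [] := by
          rw [hm] at h2
          exact List.ne_nil_of_length_pos (by simpa using h2)
        have hdl : joinDots (a :: t).dropLast = rest.take (lastDotNat rest) := by
          rw [← hm]; exact ih hr
        have hdlne : (a :: t).dropLast ≠ [] := by
          have : 0 < (a :: t).dropLast.length := by
            rw [List.length_dropLast]
            simp only [List.length_cons]
            have : 0 < t.length := List.length_pos_iff.mpr ht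
            omega
          exact List.ne_nil_of_length_pos this
        by_cases hc : c = '.'
        · subst hc
          rw [mySplit_cons_dot, hm]
          rw [List.dropLast_cons_of_ne_nil (List.cons_ne_nil a t)]
          rw [joinDots_nil_cons _ hdlne, hdl]
          simp [lastDotNat, hr]
        · rw [mySplit_cons_ne c rest a t hc hm]
          rw [List.dropLast_cons_of_ne_nil ht]
          have hback : a :: t.dropLast = (a :: t).dropLast :=
            (List.dropLast_cons_of_ne_nil ht).symm
          rw [joinDots_cons_head, hback, hdl]
          simp [lastDotNat, hr]
    · have hc : c = '.' := by
        rcases List.mem_cons.mp h with h' | h'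
        · exact h'.symm
        · exact absurd h' hr
      subst hc
      rw [mySplit_cons_dot, mySplit_no_dot rest hr]
      simp [joinDots, lastDotNat, hr]

-- A's rejoin loop, once started (0 < i), appends '.' before every remaining segment.
theorem foldA_pos (l : List (List Char)) (i : Int) (s : List Char) (hi : 0 < i) :
    ((l.map String.ofList).foldl
      (fun (st : Int × List Char) u =>
        if st.1 == 0 then (st.1 + 1, st.2 ++ u.toList)
        else (st.1 + 1, (st.2 ++ ['.']) ++ u.toList)) (i, s)).2
    = s ++ l.flatMap (fun u => '.' :: u) := by
  induction l generalizing i s with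
  | nil => simp
  | cons h t ih =>
    have hne : (i == 0) = false := by
      simp only [beq_eq_false_iff_ne, ne_eq]
      omega
    simp only [List.map_cons, List.foldl_cons, hne, Bool.false_eq_true, if_false]
    rw [ih (i + 1) _ (by omega)]
    simp [List.flatMap_cons]

-- A's full rejoin loop computes joinDots.
theorem foldA (l : List (List Char)) (hne : l ≠ []) :
    ((l.map String.ofList).foldl
      (fun (st : Int × List Char) u =>
        if st.1 == 0 then (st.1 + 1, st.2 ++ u.toList)
        else (st.1 + 1, (st.2 ++ ['.']) ++ u.toList)) ((0 : Int), ([] : List Char))).2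
    = joinDots l := by
  cases l with
  | nil => exact absurd rfl hne
  | cons h t =>
    simp only [List.map_cons, List.foldl_cons, beq_self_eq_true, if_true]
    rw [foldA_pos t (0 + 1) _ (by omega)]
    simp [joinDots]

theorem isIn_dot (s : String) : PySem.Str.isIn "." s = true ↔ '.' ∈ s.toList := by
  have hsep : (".".toList) = ['.'] := rfl
  rw [PySem.Str.isIn, hsep, PySem.Chars.isIn_iff_infix]
  constructor
  · intro h
    exact h.subset (by simp)
  · intro h
    rcases List.append_of_mem h with ⟨u, v, hsp⟩
    exact ⟨u, v, by rw [hsp]; simp⟩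

theorem take_len_sub_one {α : Type} (l : List α) : l.take (l.length - 1) = l.dropLast := by
  induction l with
  | nil => rfl
  | cons a t ih =>
    cases t with
    | nil => rfl
    | cons b t' =>
      simp only [List.length_cons, Nat.add_sub_cancel, List.take_succ_cons,
        List.dropLast_cons_of_ne_nil (List.cons_ne_nil b t')]
      simpa using ih

-- ===== VERDICT (by name: the statement is the Claim_ definition above) =====
theorem ParseUpperSection_spec : Claim_equal_ParseUpperSection := by
  intro s _
  show ParseUpperSection s = ParseUpperSection_alt s
  have hM := mySplit_ne_nil s.toList
  have hlen1 : 1 ≤ (mySplit s.toList).length := List.length_pos_iff.mpr hM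
  have hn1 : (((mySplit s.toList).length : Int) - 1)
      = (((mySplit s.toList).length - 1 : Nat) : Int) := by omega
  by_cases hdot : '.' ∈ s.toList
  · -- there is a dot: A joins all but the last segment, B slices at the last dot
    have h2 := mySplit_two_le s.toList hdot
    rw [ParseUpperSection_alt, if_pos ((isIn_dot s).mpr hdot)]
    have hsub : (".".toList) = ['.'] := rfl
    rw [PySem.Str.slice, PySem.Str.rfind, hsub, rfind_eq_lastDotNat s.toList hdot]
    rw [PySem.Chars.slice_eq_listSlice, PySem.List.slice_to_natCast]
    simp only [ParseUpperSection, split_dot, Option.getD_some, PySem.List.len_eq,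
      PySem.List.slice_zero_start, List.length_map]
    rw [hn1, PySem.List.slice_to_natCast]
    rw [← List.map_take, take_len_sub_one]
    have hupne : (mySplit s.toList).dropLast ≠ [] := by
      have : 1 ≤ (mySplit s.toList).dropLast.length := by
        rw [List.length_dropLast]; omega
      exact List.ne_nil_of_length_pos (by omega)
    have hlenif : ((((mySplit s.toList).dropLast.map String.ofList).length : Int) == 0) = false := by
      rw [beq_eq_false_iff_ne]
      simp only [List.length_map, List.length_dropLast]
      omega
    rw [hlenif]
    simp only [Bool.false_eq_true, if_false]
    rw [foldA _ hupne, joinDots_dropLast s.toList hdot]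
  · -- no dot: both return ""
    rw [ParseUpperSection_alt, if_neg (by
      intro hin
      exact hdot ((isIn_dot s).mp hin))]
    have hone : mySplit s.toList = [s.toList] := mySplit_no_dot s.toList hdot
    have hz : ((1 : Nat) : Int) - 1 = ((0 : Nat) : Int) := by omega
    simp only [ParseUpperSection, split_dot, Option.getD_some, hone, List.map_cons,
      List.map_nil, PySem.List.len_eq, List.length_cons, List.length_nil,
      PySem.List.slice_zero_start]
    norm_num
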